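-- pv_equiv track=rewrite | github.com/Adeptus-Astartes/algorithms | codility/sum_of_digits_2x_bigger_than_x.py | compute
-- ===== SOURCE A (Python) =====
-- def compute(X):
--     def digit_sum(num):
--         return sum(map(int, str(num)))
--
--     target_sum = 2 * digit_sum(X)
--     current_num = X + 1
--
--     while digit_sum(current_num) != target_sum:
--         current_num += 1
--
--     return current_num
-- ===== SOURCE B (Python) =====
-- def compute(X):
--     def fill(r):
--         # smallest number with digit sum r (r >= 0)
--         q, rem = divmod(r, 9)
--         return (rem + 1) * 10 ** q - 1
--
--     # digit sum of X
--     s, p = 0, X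
--     while p > 0:
--         s += p % 10
--         p //= 10
--     S = 2 * s
--
--     # scan break positions from least significant: keep X's digits above
--     # position j, raise digit at j, fill j low digits minimally
--     p, sp, j = X, s, 0
--     while p > 0:
--         d0 = p % 10
--         hi = p // 10
--         shi = sp - d0
--         d = max(d0 + 1, S - shi - 9 * j)
--         if d <= 9 and S - shi - d >= 0:
--             return (hi * 10 + d) * 10 ** j + fill(S - shi - d)
--         p, sp, j = hi, shi, j + 1
--
--     # no same-length answer: smallest longer number with digit sum S
--     L = max(j + 1, -(-S // 9))
--     lead = max(1, S - 9 * (L - 1))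
--     return lead * 10 ** (L - 1) + fill(S - lead)
-- ===== Notes on version B (the rewrite author's own statement) =====
-- stated objective: faster
-- what changed: A linearly scans X+1, X+2, ... recomputing the digit sum from str() until it hits 2*digitsum(X); B constructs the answer directly: it scans break positions of X from the least significant digit, raises one digit and fills the lower digits with the minimal suffix of the required digit sum (closed form), falling back to the minimal longer number with that digit sum; intended as asymptotically faster (a timing run measured A hundreds of times slower or timing out on larger inputs).
import Mathlib
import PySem

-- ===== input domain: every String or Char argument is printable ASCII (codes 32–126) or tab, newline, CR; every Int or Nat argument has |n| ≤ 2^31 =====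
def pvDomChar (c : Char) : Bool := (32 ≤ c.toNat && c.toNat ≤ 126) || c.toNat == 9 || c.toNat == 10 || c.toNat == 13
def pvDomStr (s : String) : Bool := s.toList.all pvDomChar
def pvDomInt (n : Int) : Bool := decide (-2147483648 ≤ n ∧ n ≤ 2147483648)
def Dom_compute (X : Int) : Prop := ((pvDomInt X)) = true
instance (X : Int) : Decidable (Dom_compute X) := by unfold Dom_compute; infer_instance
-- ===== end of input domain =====

-- B replaces A's one-by-one scan (recomputing the digit sum from str() each step) by a direct
-- greedy construction of the smallest number above X with the required digit sum
-- (objective: faster; intended as asymptotically faster, measured).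

-- ===== PORT A =====
-- int(c) applied to one character of str(num); `.getD 0` is junk only where Python raises
-- (the '-' of a negative num), which Pre_compute excludes.
def pvCharVal (c : Char) : Int := (PySem.Int.ofChars? [c]).getD 0

-- digit_sum(num) = sum(map(int, str(num)))
def dsumA (num : Int) : Int := ((PySem.Int.toChars num).map pvCharVal).sum

-- decimal digit sum on the Nat side (proof-side helper; the port's termination argument needs it)
def dsN (n : Nat) : Nat := (Nat.digits 10 n).sum

theorem dsN_mul_ten_add (a d : Nat) (hd : d < 10) : dsN (10 * a + d) = dsN a + d := by
  unfold dsN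
  rcases Nat.eq_zero_or_pos (10 * a + d) with h0 | hpos
  · have ha : a = 0 := by omega
    have hdz : d = 0 := by omega
    simp [ha, hdz]
  · rw [Nat.digits_def' (by norm_num : (1:Nat) < 10) hpos]
    have h1 : (10 * a + d) % 10 = d := by omega
    have h2 : (10 * a + d) / 10 = a := by omega
    simp only [List.sum_cons, h1, h2]
    omega

theorem dsN_lt_ten (n : Nat) (h : n < 10) : dsN n = n := by
  have := dsN_mul_ten_add 0 n h
  simpa [dsN] using this

theorem dsN_pos (n : Nat) (h : 1 ≤ n) : 1 ≤ dsN n := by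
  induction n using Nat.strong_induction_on with
  | _ n IH =>
    have hrec : dsN n = dsN (n / 10) + n % 10 := by
      have := dsN_mul_ten_add (n / 10) (n % 10) (by omega)
      rw [← this]
      congr 1
      omega
    by_cases h10 : n % 10 = 0
    · have hd : 1 ≤ n / 10 := by omega
      have := IH (n / 10) (by omega) hd
      omega
    · omega

-- a number with digit sum s: s ones
def pvOnes (s : Nat) : Nat := Nat.rec 0 (fun _ r => 10 * r + 1) s

theorem dsN_pvOnes (s : Nat) : dsN (pvOnes s) = s := by
  induction s with
  | zero => simp [pvOnes, dsN]
  | succ s ih =>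
    have : pvOnes (s + 1) = 10 * pvOnes s + 1 := rfl
    rw [this, dsN_mul_ten_add _ _ (by norm_num), ih]

theorem pvOnes_pos (s : Nat) (h : 1 ≤ s) : 1 ≤ pvOnes s := by
  cases s with
  | zero => omega
  | succ s =>
    have : pvOnes (s + 1) = 10 * pvOnes s + 1 := rfl
    omega

theorem dsN_mul_pow_add (a k : Nat) : ∀ b, b < 10 ^ k → dsN (a * 10 ^ k + b) = dsN a + dsN b := by
  induction k with
  | zero =>
    intro b hb
    have : b = 0 := by simpa using hb
    simp [this, dsN]
  | succ k ih =>
    intro b hb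
    have hsplit : a * 10 ^ (k + 1) + b = 10 * (a * 10 ^ k + b / 10) + b % 10 := by
      have : b = 10 * (b / 10) + b % 10 := by omega
      ring_nf
      omega
    have hb10 : b / 10 < 10 ^ k := by
      have : b < 10 ^ k * 10 := by rw [← pow_succ]; exact hb
      omega
    rw [hsplit, dsN_mul_ten_add _ _ (by omega), ih _ hb10]
    have hb' : dsN b = dsN (b / 10) + b % 10 := by
      have := dsN_mul_ten_add (b / 10) (b % 10) (by omega)
      rw [← this]
      congr 1
      omega
    omega

theorem dsN_mul_pow (a k : Nat) : dsN (a * 10 ^ k) = dsN a := by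
  have := dsN_mul_pow_add a k 0 (by positivity)
  simpa [dsN] using this

theorem charVal_digitChar (d : Nat) (hd : d < 10) : pvCharVal (Nat.digitChar d) = (d : Int) := by
  interval_cases d <;> decide

theorem sum_charVal_toDigitsCore (fuel : Nat) :
    ∀ n ds, n < fuel →
      ((Nat.toDigitsCore 10 fuel n ds).map pvCharVal).sum
        = (dsN n : Int) + ((ds.map pvCharVal).sum) := by
  induction fuel with
  | zero => intro n ds h; omega
  | succ fuel ih =>
    intro n ds h
    rw [Nat.toDigitsCore]
    by_cases h0 : n / 10 = 0
    · have hn : n < 10 := by omega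
      have hm : n % 10 = n := Nat.mod_eq_of_lt hn
      simp only [h0, if_true, hm]
      simp [charVal_digitChar n hn, dsN_lt_ten n hn]
    · simp only [h0, if_false]
      rw [ih (n / 10) _ (by omega)]
      have hrec : dsN n = dsN (n / 10) + n % 10 := by
        have := dsN_mul_ten_add (n / 10) (n % 10) (by omega)
        rw [← this]; congr 1; omega
      simp [charVal_digitChar _ (by omega : n % 10 < 10), hrec]
      ring

theorem dsumA_natCast (n : Nat) : dsumA (n : Int) = (dsN n : Int) := by
  unfold dsumA PySem.Int.toChars
  have hlt : ¬ ((n : Int) < 0) := by omega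
  simp only [hlt, if_false, Int.toNat_natCast]
  unfold Nat.toDigits
  simpa using sum_charVal_toDigitsCore (n + 1) n [] (by omega)

-- the while loop terminates: some number above any bound has digit sum 2*digit_sum(X)
theorem pvExistsSol (X : Int) (hX : 1 ≤ X) :
    ∃ k : Nat, dsumA (X + 1 + (k : Int)) = 2 * dsumA X := by
  set N := X.toNat with hN
  have hXN : (N : Int) = X := by omega
  set s := 2 * dsN N with hs
  have hs1 : 1 ≤ s := by
    have := dsN_pos N (by omega)
    omega
  -- witness: s ones followed by enough zeros
  set w := pvOnes s * 10 ^ (N + 2) with hw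
  have hgt : (X + 1) ≤ (w : Int) := by
    have h1 : 1 ≤ pvOnes s := pvOnes_pos s hs1
    have h2 : N + 2 < 10 ^ (N + 2) := Nat.lt_pow_self (by norm_num)
    have : N + 2 ≤ w := by
      calc N + 2 ≤ 10 ^ (N + 2) := by omega
        _ ≤ pvOnes s * 10 ^ (N + 2) := Nat.le_mul_of_pos_left _ (by omega)
    omega
  refine ⟨(w - (X + 1).toNat : Nat), ?_⟩
  have harg : X + 1 + ((w - (X + 1).toNat : Nat) : Int) = (w : Int) := by
    have : (X + 1).toNat ≤ w := by omega
    push_cast [this]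
    omega
  rw [harg, dsumA_natCast, ← hXN, dsumA_natCast, hw, dsN_mul_pow, dsN_pvOnes]
  omega

theorem pvLoopA_next {S cur : Int} (h : ∃ k : Nat, dsumA (cur + (k : Int)) = S)
    (hc : ¬ dsumA cur = S) : ∃ k : Nat, dsumA (cur + 1 + (k : Int)) = S := by
  obtain ⟨k, hk⟩ := h
  have hk0 : k ≠ 0 := by
    rintro rfl
    simp at hk
    exact hc hk
  refine ⟨k - 1, ?_⟩
  have : cur + 1 + ((k - 1 : Nat) : Int) = cur + (k : Int) := by
    have h1 : 1 ≤ k := by omega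
    push_cast [h1]
    ring
  rw [this]; exact hk

theorem pvLoopA_find_lt {S cur : Int} (h : ∃ k : Nat, dsumA (cur + (k : Int)) = S)
    (hc : ¬ dsumA cur = S) : Nat.find (pvLoopA_next h hc) < Nat.find h := by
  have hspec := Nat.find_spec h
  have hk0 : Nat.find h ≠ 0 := by
    intro h0
    rw [h0] at hspec
    simp at hspec
    exact hc hspec
  have hle : Nat.find (pvLoopA_next h hc) ≤ Nat.find h - 1 := by
    apply Nat.find_min'
    have : cur + 1 + ((Nat.find h - 1 : Nat) : Int) = cur + (Nat.find h : Int) := by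
      have h1 : 1 ≤ Nat.find h := by omega
      push_cast [h1]
      ring
    rw [this]; exact hspec
  omega

-- the while loop of A: current_num += 1 until digit_sum(current_num) == target_sum
def loopA (S cur : Int) (h : ∃ k : Nat, dsumA (cur + (k : Int)) = S) : Int :=
  if hc : dsumA cur = S then cur
  else loopA S (cur + 1) (pvLoopA_next h hc)
termination_by Nat.find h
decreasing_by exact pvLoopA_find_lt h hc

def compute (X : Int) : Int :=
  -- target_sum = 2 * digit_sum(X); current_num = X + 1; while … += 1
  -- the dite only totalizes the while loop: for X ≤ 0 Python raises or never returns (outside Pre_)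
  if hX : 1 ≤ X then loopA (2 * dsumA X) (X + 1) (pvExistsSol X hX) else 0

-- ===== PORT B =====
-- fill(r): smallest number with digit sum r; 10 ** q ported as 10 ^ q.toNat (exact for r ≥ 0,
-- the only values it is applied to inside Pre_)
def fillB (r : Int) : Int :=
  let q := PySem.Int.floordiv r 9
  let rem := PySem.Int.mod r 9
  (rem + 1) * 10 ^ q.toNat - 1

-- first while loop of Source B: digit sum of X
def sumLoopB (p s : Int) : Int :=
  if h : 0 < p then sumLoopB (PySem.Int.floordiv p 10) (s + PySem.Int.mod p 10) else s
termination_by p.toNat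
decreasing_by
  have := PySem.Int.floordiv_eq_ediv_of_pos (a := p) (b := 10) (by norm_num)
  rw [this]
  omega

-- second while loop of Source B (its base case is the code after the loop); j stays ≥ 0,
-- 10 ** j ported as 10 ^ j.toNat, ceil -(-S // 9) via floordiv
def loopB (S p sp j : Int) : Int :=
  if h : 0 < p then
    let d0 := PySem.Int.mod p 10
    let hi := PySem.Int.floordiv p 10
    let shi := sp - d0
    let d := max (d0 + 1) (S - shi - 9 * j)
    if d ≤ 9 ∧ 0 ≤ S - shi - d then
      (hi * 10 + d) * 10 ^ j.toNat + fillB (S - shi - d)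
    else loopB S hi shi (j + 1)
  else
    let L := max (j + 1) (-(PySem.Int.floordiv (-S) 9))
    let lead := max 1 (S - 9 * (L - 1))
    lead * 10 ^ (L - 1).toNat + fillB (S - lead)
termination_by p.toNat
decreasing_by
  have := PySem.Int.floordiv_eq_ediv_of_pos (a := p) (b := 10) (by norm_num)
  rw [this]
  omega

def compute_alt (X : Int) : Int :=
  let s := sumLoopB X 0
  let S := 2 * s
  loopB S X s 0

-- ===== PRECONDITION & SPEC =====
-- Pre_: exactly the inputs on which Python A returns: on negative X it raises ValueError
-- (int of the minus sign), and at zero A's while loop never terminates (no larger number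
-- has an empty digit sum, so the target is never reached).
def Pre_compute (X : Int) : Prop := 1 ≤ X
instance (X : Int) : Decidable (Pre_compute X) := by unfold Pre_compute; infer_instance

def pvWitness_compute : Int := 5

def Spec_compute (X : Int) (out : Int) : Prop := out = compute_alt X
instance (X : Int) (out : Int) : Decidable (Spec_compute X out) := by unfold Spec_compute; infer_instance

-- ===== CLAIM (what is proved, stated in full; the proofs are below) =====
def Claim_equal_compute : Prop := ∀ (X : Int), Dom_compute X → Pre_compute X → Spec_compute X (compute X)

-- ===== LEMMAS AND PROOFS =====

-- Nat-side mirror of B with truncated subtraction, used to state the correctness invariant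
def fillN (r : Nat) : Nat := (r % 9 + 1) * 10 ^ (r / 9) - 1

def tailN (S j : Nat) : Nat :=
  let L := max (j + 1) ((S + 8) / 9)
  let lead := max 1 (S - 9 * (L - 1))
  lead * 10 ^ (L - 1) + fillN (S - lead)

def loopN (S p sp j : Nat) : Nat :=
  if h : 0 < p then
    if max (p % 10 + 1) (S - (sp - p % 10) - 9 * j) ≤ 9 ∧
        (sp - p % 10) + max (p % 10 + 1) (S - (sp - p % 10) - 9 * j) ≤ S then
      (p / 10 * 10 + max (p % 10 + 1) (S - (sp - p % 10) - 9 * j)) * 10 ^ j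
        + fillN (S - (sp - p % 10) - max (p % 10 + 1) (S - (sp - p % 10) - 9 * j))
    else loopN S (p / 10) (sp - p % 10) (j + 1)
  else tailN S j
termination_by p
decreasing_by omega

theorem dsN_div_mod (n : Nat) : dsN n = dsN (n / 10) + n % 10 := by
  rcases Nat.eq_zero_or_pos n with h0 | hpos
  · subst h0; simp [dsN]
  · have := dsN_mul_ten_add (n / 10) (n % 10) (by omega)
    rw [← this]; congr 1; omega

theorem dsN_le_of_lt_pow (k : Nat) : ∀ n, n < 10 ^ k → dsN n ≤ 9 * k := by
  induction k with
  | zero => intro n h; interval_cases n; simp [dsN]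
  | succ k ih =>
    intro n h
    have hrec : dsN n = dsN (n / 10) + n % 10 := by
      have := dsN_mul_ten_add (n / 10) (n % 10) (by omega)
      rw [← this]; congr 1; omega
    have h10 : n / 10 < 10 ^ k := by
      have : n < 10 ^ k * 10 := by rw [← pow_succ]; exact h
      omega
    have := ih (n / 10) h10
    omega

theorem dsN_pow_sub_one (q : Nat) : dsN (10 ^ q - 1) = 9 * q := by
  induction q with
  | zero => simp [dsN]
  | succ q ih =>
    have hpow : 1 ≤ 10 ^ q := Nat.one_le_pow _ _ (by norm_num)
    have hsplit : 10 ^ (q + 1) - 1 = 10 * (10 ^ q - 1) + 9 := by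
      have : 10 ^ (q + 1) = 10 * 10 ^ q := by ring
      omega
    rw [hsplit, dsN_mul_ten_add _ _ (by norm_num), ih]
    ring

theorem fillN_eq (r : Nat) : fillN r = r % 9 * 10 ^ (r / 9) + (10 ^ (r / 9) - 1) := by
  unfold fillN
  have hpow : 1 ≤ 10 ^ (r / 9) := Nat.one_le_pow _ _ (by norm_num)
  have : (r % 9 + 1) * 10 ^ (r / 9) = r % 9 * 10 ^ (r / 9) + 10 ^ (r / 9) := by ring
  omega

theorem dsN_fillN (r : Nat) : dsN (fillN r) = r := by
  rw [fillN_eq]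
  have hpow : 1 ≤ 10 ^ (r / 9) := Nat.one_le_pow _ _ (by norm_num)
  rw [dsN_mul_pow_add _ _ _ (by omega)]
  rw [dsN_pow_sub_one, dsN_lt_ten _ (by omega)]
  omega

theorem fillN_lt (r k : Nat) (h : r ≤ 9 * k) : fillN r < 10 ^ k := by
  unfold fillN
  have hq : r / 9 ≤ k := by omega
  rcases Nat.lt_or_ge (r / 9) k with hlt | hge
  · have h1 : 10 ^ (r / 9 + 1) ≤ 10 ^ k := Nat.pow_le_pow_right (by norm_num) (by omega)
    have h2 : (r % 9 + 1) * 10 ^ (r / 9) ≤ 10 * 10 ^ (r / 9) := by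
      apply Nat.mul_le_mul_right
      omega
    have h3 : 10 * 10 ^ (r / 9) = 10 ^ (r / 9 + 1) := by ring
    have hpow : 1 ≤ 10 ^ k := Nat.one_le_pow _ _ (by norm_num)
    omega
  · have hqk : r / 9 = k := by omega
    have hr : r = 9 * k := by omega
    have hm : r % 9 = 0 := by omega
    rw [hqk, hm]
    have hpow : 1 ≤ 10 ^ k := Nat.one_le_pow _ _ (by norm_num)
    omega

theorem fillN_step (r d : Nat) (hd : d ≤ 9) : fillN (r + d) ≤ 10 * fillN r + d := by
  unfold fillN
  have hpow : 1 ≤ 10 ^ (r / 9) := Nat.one_le_pow _ _ (by norm_num)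
  rcases Nat.lt_or_ge (r % 9 + d) 9 with hc | hc
  · have h1 : (r + d) / 9 = r / 9 := by omega
    have h2 : (r + d) % 9 = r % 9 + d := by omega
    rw [h1, h2]
    set P := 10 ^ (r / 9) with hP
    have hA : (r % 9 + d + 1) * P + (9 - d) * P ≤ (r % 9 + 1) * 10 * P := by
      have hco : (r % 9 + d + 1) + (9 - d) ≤ (r % 9 + 1) * 10 := by omega
      calc (r % 9 + d + 1) * P + (9 - d) * P = ((r % 9 + d + 1) + (9 - d)) * P := by ring
        _ ≤ (r % 9 + 1) * 10 * P := Nat.mul_le_mul_right P hco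
    have hB : 9 - d ≤ (9 - d) * P := Nat.le_mul_of_pos_right _ (by omega)
    have hC : (r % 9 + 1) * 10 * P = 10 * ((r % 9 + 1) * P) := by ring
    omega
  · have h1 : (r + d) / 9 = r / 9 + 1 := by omega
    have h2 : (r + d) % 9 = r % 9 + d - 9 := by omega
    rw [h1, h2]
    have hPs : 10 ^ (r / 9 + 1) = 10 * 10 ^ (r / 9) := by ring
    set P := 10 ^ (r / 9) with hP
    rw [hPs]
    have hco : (r % 9 + d - 9 + 1) ≤ (r % 9 + 1) := by omega
    have hA : (r % 9 + d - 9 + 1) * (10 * P) ≤ (r % 9 + 1) * (10 * P) :=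
      Nat.mul_le_mul_right _ hco
    rcases Nat.eq_or_lt_of_le hd with h9 | h9
    · have : (r % 9 + d - 9 + 1) = r % 9 + 1 := by omega
      rw [this]
      have hC : (r % 9 + 1) * (10 * P) = 10 * ((r % 9 + 1) * P) := by ring
      omega
    · have hco2 : (r % 9 + d - 9 + 1) + 1 ≤ r % 9 + 1 := by omega
      have hA2 : ((r % 9 + d - 9 + 1) + 1) * (10 * P) ≤ (r % 9 + 1) * (10 * P) :=
        Nat.mul_le_mul_right _ hco2
      have hexp : ((r % 9 + d - 9 + 1) + 1) * (10 * P) = (r % 9 + d - 9 + 1) * (10 * P) + 10 * P := by ring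
      have hC : (r % 9 + 1) * (10 * P) = 10 * ((r % 9 + 1) * P) := by ring
      omega

theorem fillN_min (n : Nat) : fillN (dsN n) ≤ n := by
  induction n using Nat.strong_induction_on with
  | _ n IH =>
    rcases Nat.eq_zero_or_pos n with h0 | hpos
    · subst h0
      simp [dsN, fillN]
    · have hrec : dsN n = dsN (n / 10) + n % 10 := by
        have := dsN_mul_ten_add (n / 10) (n % 10) (by omega)
        rw [← this]; congr 1; omega
      rw [hrec]
      have h1 := fillN_step (dsN (n / 10)) (n % 10) (by omega)
      have h2 := IH (n / 10) (by omega)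
      omega

theorem tailN_core (S j X L lead : Nat) (hS : 1 ≤ S) (hX : X < 10 ^ j)
    (hL : L = max (j + 1) ((S + 8) / 9)) (hlead : lead = max 1 (S - 9 * (L - 1))) :
    dsN (lead * 10 ^ (L - 1) + fillN (S - lead)) = S ∧
      X < lead * 10 ^ (L - 1) + fillN (S - lead) ∧
      ∀ n, dsN n = S → 10 ^ j ≤ n → lead * 10 ^ (L - 1) + fillN (S - lead) ≤ n := by
  have hL1 : j + 1 ≤ L := by rw [hL]; exact le_max_left _ _
  have h9 : (S + 8) / 9 ≤ L := by rw [hL]; exact le_max_right _ _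
  have hceil : S ≤ 9 * L := by omega
  have hlead1 : 1 ≤ lead := by rw [hlead]; exact le_max_left _ _
  have hlead_ge : S - 9 * (L - 1) ≤ lead := by rw [hlead]; exact le_max_right _ _
  have hlead9 : lead ≤ 9 := by
    rw [hlead]
    exact max_le (by norm_num) (by omega)
  have hleadS : lead ≤ S := by
    rw [hlead]
    exact max_le hS (by omega)
  have hrem : S - lead ≤ 9 * (L - 1) := by omega
  have hfill_lt : fillN (S - lead) < 10 ^ (L - 1) := fillN_lt _ _ hrem
  have hP1 : 1 ≤ 10 ^ (L - 1) := Nat.one_le_pow _ _ (by norm_num)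
  have hds : dsN (lead * 10 ^ (L - 1) + fillN (S - lead)) = S := by
    rw [dsN_mul_pow_add _ _ _ hfill_lt, dsN_fillN, dsN_lt_ten lead (by omega)]
    omega
  have hpowj : (10 : Nat) ^ j ≤ 10 ^ (L - 1) := Nat.pow_le_pow_right (by norm_num) (by omega)
  have hgt : X < lead * 10 ^ (L - 1) + fillN (S - lead) := by
    have : 10 ^ (L - 1) ≤ lead * 10 ^ (L - 1) := Nat.le_mul_of_pos_left _ (by omega)
    omega
  refine ⟨hds, hgt, ?_⟩
  intro n hn hnj
  have hpowL : (10 : Nat) ^ L = 10 * 10 ^ (L - 1) := by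
    have h := pow_succ 10 (L - 1)
    have h2 : L - 1 + 1 = L := by omega
    rw [h2] at h
    omega
  rcases Nat.lt_or_ge n (10 ^ L) with hnL | hnL
  · -- n has exactly L digits
    have hge : 10 ^ (L - 1) ≤ n := by
      rcases Nat.eq_or_lt_of_le hL1 with hLe | hLl
      · have : L - 1 = j := by omega
        rw [this]; exact hnj
      · have hmc := max_choice (j + 1) ((S + 8) / 9)
        rw [← hL] at hmc
        by_contra hlt
        have hlt' : n < 10 ^ (L - 1) := by omega
        have := dsN_le_of_lt_pow (L - 1) n hlt'
        omega
    have hn_split : n = n / 10 ^ (L - 1) * 10 ^ (L - 1) + n % 10 ^ (L - 1) :=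
      (Nat.div_add_mod' _ _).symm
    have hlo : n % 10 ^ (L - 1) < 10 ^ (L - 1) := Nat.mod_lt _ (by omega)
    set e := n / 10 ^ (L - 1) with he
    have he9 : e < 10 := by
      rw [he]
      rw [Nat.div_lt_iff_lt_mul (by omega)]
      omega
    have he1 : 1 ≤ e := by
      rw [he]
      have := Nat.div_pos hge (show 0 < 10 ^ (L - 1) by omega)
      omega
    have hdsn : e + dsN (n % 10 ^ (L - 1)) = S := by
      rw [hn_split, dsN_mul_pow_add _ _ _ hlo, dsN_lt_ten e he9] at hn
      exact hn
    have hlo_ds : dsN (n % 10 ^ (L - 1)) ≤ 9 * (L - 1) := dsN_le_of_lt_pow _ _ hlo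
    have heL : lead ≤ e := by omega
    rcases Nat.eq_or_lt_of_le heL with heq | hlt2
    · have hmin := fillN_min (n % 10 ^ (L - 1))
      have harg : dsN (n % 10 ^ (L - 1)) = S - lead := by omega
      rw [harg] at hmin
      rw [← heq] at hn_split
      omega
    · have h1 : (lead + 1) * 10 ^ (L - 1) ≤ e * 10 ^ (L - 1) :=
        Nat.mul_le_mul_right _ (by omega)
      have h2 : (lead + 1) * 10 ^ (L - 1) = lead * 10 ^ (L - 1) + 10 ^ (L - 1) := by ring
      omega
  · have h1 : lead * 10 ^ (L - 1) ≤ 9 * 10 ^ (L - 1) := Nat.mul_le_mul_right _ hlead9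
    omega

theorem tailN_spec (S j X : Nat) (hS : 1 ≤ S) (hX : X < 10 ^ j) :
    dsN (tailN S j) = S ∧ X < tailN S j ∧
      ∀ n, dsN n = S → 10 ^ j ≤ n → tailN S j ≤ n := by
  exact tailN_core S j X _ _ hS hX rfl rfl

theorem loopN_spec (S X : Nat) (hS : 1 ≤ S) :
    ∀ p, ∀ j sp, p = X / 10 ^ j → sp = dsN p →
      dsN (loopN S p sp j) = S ∧ X < loopN S p sp j ∧
        ∀ n, dsN n = S → X / 10 ^ j < n / 10 ^ j → loopN S p sp j ≤ n := by
  intro p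
  induction p using Nat.strong_induction_on with
  | _ p IH =>
    intro j sp hp hsp
    rw [loopN]
    by_cases hp0 : 0 < p
    · rw [dif_pos hp0]
      set shi := sp - p % 10 with hshi
      set d := max (p % 10 + 1) (S - shi - 9 * j) with hd
      have hpow_pos : 0 < (10 : Nat) ^ j := Nat.one_le_pow _ _ (by norm_num)
      have hshi_ds : shi = dsN (p / 10) := by
        rw [hshi, hsp, dsN_div_mod p]; omega
      have hd1 : p % 10 + 1 ≤ d := by rw [hd]; exact le_max_left _ _
      have hd2 : S - shi - 9 * j ≤ d := by rw [hd]; exact le_max_right _ _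
      have hXp : X = p * 10 ^ j + X % 10 ^ j := by
        rw [hp]; exact (Nat.div_add_mod' _ _).symm
      have hXlo : X % 10 ^ j < 10 ^ j := Nat.mod_lt _ (by omega)
      have hpsplit : p = 10 * (p / 10) + p % 10 := by omega
      have hdiv_succ : X / 10 ^ (j + 1) = p / 10 := by
        rw [hp, Nat.div_div_eq_div_mul, ← pow_succ]
      by_cases hfeas : d ≤ 9 ∧ shi + d ≤ S
      · rw [if_pos hfeas]
        obtain ⟨hd9, hsd⟩ := hfeas
        have hrem9 : S - shi - d ≤ 9 * j := by omega
        have hfill : fillN (S - shi - d) < 10 ^ j := fillN_lt _ _ hrem9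
        have hcand_ds : dsN ((p / 10 * 10 + d) * 10 ^ j + fillN (S - shi - d)) = S := by
          rw [dsN_mul_pow_add _ _ _ hfill, dsN_fillN]
          have hc : p / 10 * 10 + d = 10 * (p / 10) + d := by ring
          rw [hc, dsN_mul_ten_add _ _ (by omega)]
          omega
        have hcand_gt : X < (p / 10 * 10 + d) * 10 ^ j + fillN (S - shi - d) := by
          have h1 : (p + 1) * 10 ^ j ≤ (p / 10 * 10 + d) * 10 ^ j :=
            Nat.mul_le_mul_right _ (by omega)
          have h2 : (p + 1) * 10 ^ j = p * 10 ^ j + 10 ^ j := by ring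
          omega
        refine ⟨hcand_ds, hcand_gt, ?_⟩
        intro n hn hdv
        rw [← hp] at hdv
        have hn_split : n = n / 10 ^ j * 10 ^ j + n % 10 ^ j := (Nat.div_add_mod' _ _).symm
        have hnlo : n % 10 ^ j < 10 ^ j := Nat.mod_lt _ (by omega)
        have h3 : n / 10 ^ (j + 1) = n / 10 ^ j / 10 := by
          rw [Nat.div_div_eq_div_mul, ← pow_succ]
        have hmono : p / 10 ≤ n / 10 ^ (j + 1) := by
          rw [h3]; exact Nat.div_le_div_right (by omega)
        rcases Nat.eq_or_lt_of_le hmono with hhi | hhi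
        · set e := (n / 10 ^ j) % 10 with hee
          have hnj_split : n / 10 ^ j = 10 * (p / 10) + e := by
            have h5 : n / 10 ^ j / 10 = p / 10 := by rw [← h3]; exact hhi.symm
            omega
          have he9 : e ≤ 9 := by omega
          have he_gt : p % 10 + 1 ≤ e := by omega
          have hnds : shi + e + dsN (n % 10 ^ j) = S := by
            have hds_n : dsN n = dsN (n / 10 ^ j) + dsN (n % 10 ^ j) := by
              conv_lhs => rw [hn_split]
              rw [dsN_mul_pow_add _ _ _ hnlo]
            have hds_top : dsN (n / 10 ^ j) = dsN (p / 10) + e := by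
              rw [hnj_split, dsN_mul_ten_add _ _ (by omega)]
            rw [hds_top] at hds_n
            omega
          have hnlo_ds : dsN (n % 10 ^ j) ≤ 9 * j := dsN_le_of_lt_pow _ _ hnlo
          have hde : d ≤ e := by
            rw [hd]; exact max_le (by omega) (by omega)
          rcases Nat.eq_or_lt_of_le hde with heq | hlt
          · have hmin := fillN_min (n % 10 ^ j)
            have harg : dsN (n % 10 ^ j) = S - shi - d := by omega
            rw [harg] at hmin
            have hcn : n / 10 ^ j = p / 10 * 10 + d := by omega
            rw [hcn] at hn_split
            omega
          · have h1 : (p / 10 * 10 + d + 1) * 10 ^ j ≤ n / 10 ^ j * 10 ^ j :=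
              Nat.mul_le_mul_right _ (by omega)
            have h2 : (p / 10 * 10 + d + 1) * 10 ^ j
                = (p / 10 * 10 + d) * 10 ^ j + 10 ^ j := by ring
            omega
        · have h1 : (p / 10 + 1) * 10 ^ (j + 1) ≤ n / 10 ^ (j + 1) * 10 ^ (j + 1) :=
            Nat.mul_le_mul_right _ (by omega)
          have h2 : n / 10 ^ (j + 1) * 10 ^ (j + 1) ≤ n := Nat.div_mul_le_self _ _
          have h3' : (p / 10 + 1) * 10 ^ (j + 1) = (p / 10 * 10 + 10) * 10 ^ j := by
            rw [pow_succ]; ring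
          have h4 : (p / 10 * 10 + d + 1) * 10 ^ j ≤ (p / 10 * 10 + 10) * 10 ^ j :=
            Nat.mul_le_mul_right _ (by omega)
          have h5 : (p / 10 * 10 + d + 1) * 10 ^ j
              = (p / 10 * 10 + d) * 10 ^ j + 10 ^ j := by ring
          omega
      · rw [if_neg hfeas]
        obtain ⟨g1, g2, g3⟩ :=
          IH (p / 10) (Nat.div_lt_self hp0 (by norm_num)) (j + 1) shi hdiv_succ.symm hshi_ds
        refine ⟨g1, g2, ?_⟩
        intro n hn hdv
        apply g3 n hn
        rw [← hp] at hdv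
        rw [hdiv_succ]
        have h3 : n / 10 ^ (j + 1) = n / 10 ^ j / 10 := by
          rw [Nat.div_div_eq_div_mul, ← pow_succ]
        have hmono : p / 10 ≤ n / 10 ^ (j + 1) := by
          rw [h3]; exact Nat.div_le_div_right (by omega)
        rcases Nat.eq_or_lt_of_le hmono with hhi | hhi
        · exfalso
          set e := (n / 10 ^ j) % 10 with hee
          have hnj_split : n / 10 ^ j = 10 * (p / 10) + e := by
            have h5 : n / 10 ^ j / 10 = p / 10 := by rw [← h3]; exact hhi.symm
            omega
          have hn_split : n = n / 10 ^ j * 10 ^ j + n % 10 ^ j := (Nat.div_add_mod' _ _).symm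
          have hnlo : n % 10 ^ j < 10 ^ j := Nat.mod_lt _ (by omega)
          have he9 : e ≤ 9 := by omega
          have he_gt : p % 10 + 1 ≤ e := by omega
          have hnds : shi + e + dsN (n % 10 ^ j) = S := by
            have hds_n : dsN n = dsN (n / 10 ^ j) + dsN (n % 10 ^ j) := by
              conv_lhs => rw [hn_split]
              rw [dsN_mul_pow_add _ _ _ hnlo]
            have hds_top : dsN (n / 10 ^ j) = dsN (p / 10) + e := by
              rw [hnj_split, dsN_mul_ten_add _ _ (by omega)]
            rw [hds_top] at hds_n
            omega
          have hnlo_ds : dsN (n % 10 ^ j) ≤ 9 * j := dsN_le_of_lt_pow _ _ hnlo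
          have hde : d ≤ e := by
            rw [hd]; exact max_le (by omega) (by omega)
          exact hfeas ⟨by omega, by omega⟩
        · exact hhi
    · rw [dif_neg hp0]
      have hp0' : p = 0 := by omega
      have hXj : X < 10 ^ j := by
        rcases (Nat.div_eq_zero_iff).mp (by omega : X / 10 ^ j = 0) with h | h
        · exact absurd h (by positivity)
        · exact h
      obtain ⟨t1, t2, t3⟩ := tailN_spec S j X hS hXj
      refine ⟨t1, t2, ?_⟩
      intro n hn hdv
      apply t3 n hn
      have h1 : 1 ≤ n / 10 ^ j := by omega
      have h2 : 10 ^ j ≤ n / 10 ^ j * 10 ^ j := Nat.le_mul_of_pos_left _ (by omega)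
      have h3 : n / 10 ^ j * 10 ^ j ≤ n := Nat.div_mul_le_self _ _
      omega

-- ===== bridges: the Int ports compute the Nat mirrors =====

theorem fillB_natCast (r : Nat) : fillB (r : Int) = (fillN r : Int) := by
  show (PySem.Int.mod (r : Int) 9 + 1) * 10 ^ (PySem.Int.floordiv (r : Int) 9).toNat - 1
      = ((fillN r : Nat) : Int)
  unfold fillN
  rw [PySem.Int.floordiv_eq_ediv_of_pos (by norm_num), PySem.Int.mod_eq_emod_of_pos (by norm_num)]
  have h1 : (r : Int) % 9 = ((r % 9 : Nat) : Int) := by omega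
  have h2 : (r : Int) / 9 = ((r / 9 : Nat) : Int) := by omega
  rw [h1, h2, Int.toNat_natCast]
  have hpow : 1 ≤ (r % 9 + 1) * 10 ^ (r / 9) :=
    Nat.one_le_iff_ne_zero.mpr (by positivity)
  rw [Nat.cast_sub hpow]
  push_cast
  ring

theorem sumLoopB_natCast (n : Nat) : ∀ s : Int, sumLoopB (n : Int) s = s + (dsN n : Int) := by
  induction n using Nat.strong_induction_on with
  | _ n IH =>
    intro s
    rw [sumLoopB]
    by_cases h : 0 < n
    · have h' : (0 : Int) < (n : Int) := by omega
      rw [dif_pos h']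
      have hdiv : PySem.Int.floordiv (n : Int) 10 = ((n / 10 : Nat) : Int) := by
        rw [PySem.Int.floordiv_eq_ediv_of_pos (by norm_num)]; omega
      have hmod : PySem.Int.mod (n : Int) 10 = ((n % 10 : Nat) : Int) := by
        rw [PySem.Int.mod_eq_emod_of_pos (by norm_num)]; omega
      rw [hdiv, hmod, IH (n / 10) (by omega)]
      have := dsN_div_mod n
      push_cast
      omega
    · have h' : ¬ (0 : Int) < (n : Int) := by omega
      rw [dif_neg h']
      have : n = 0 := by omega
      subst this
      simp [dsN]

theorem loopB_pos (S p sp j : Int) (h : 0 < p) :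
    loopB S p sp j =
      if max (PySem.Int.mod p 10 + 1) (S - (sp - PySem.Int.mod p 10) - 9 * j) ≤ 9 ∧
          0 ≤ S - (sp - PySem.Int.mod p 10)
              - max (PySem.Int.mod p 10 + 1) (S - (sp - PySem.Int.mod p 10) - 9 * j) then
        (PySem.Int.floordiv p 10 * 10
            + max (PySem.Int.mod p 10 + 1) (S - (sp - PySem.Int.mod p 10) - 9 * j)) * 10 ^ j.toNat
          + fillB (S - (sp - PySem.Int.mod p 10)
              - max (PySem.Int.mod p 10 + 1) (S - (sp - PySem.Int.mod p 10) - 9 * j))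
      else loopB S (PySem.Int.floordiv p 10) (sp - PySem.Int.mod p 10) (j + 1) := by
  rw [loopB, dif_pos h]

theorem loopB_neg (S p sp j : Int) (h : ¬ 0 < p) :
    loopB S p sp j =
      max 1 (S - 9 * (max (j + 1) (-(PySem.Int.floordiv (-S) 9)) - 1))
          * 10 ^ (max (j + 1) (-(PySem.Int.floordiv (-S) 9)) - 1).toNat
        + fillB (S - max 1 (S - 9 * (max (j + 1) (-(PySem.Int.floordiv (-S) 9)) - 1))) := by
  rw [loopB, dif_neg h]

theorem loopN_pos (S p sp j : Nat) (h : 0 < p) :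
    loopN S p sp j =
      if max (p % 10 + 1) (S - (sp - p % 10) - 9 * j) ≤ 9 ∧
          (sp - p % 10) + max (p % 10 + 1) (S - (sp - p % 10) - 9 * j) ≤ S then
        (p / 10 * 10 + max (p % 10 + 1) (S - (sp - p % 10) - 9 * j)) * 10 ^ j
          + fillN (S - (sp - p % 10) - max (p % 10 + 1) (S - (sp - p % 10) - 9 * j))
      else loopN S (p / 10) (sp - p % 10) (j + 1) := by
  rw [loopN, dif_pos h]

theorem loopN_neg (S p sp j : Nat) (h : ¬ 0 < p) : loopN S p sp j = tailN S j := by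
  rw [loopN, dif_neg h]

theorem loopB_natCast (S : Nat) (hS : 1 ≤ S) :
    ∀ p : Nat, ∀ j : Nat,
      loopB (S : Int) (p : Int) (dsN p : Int) ((j : Nat) : Int) = (loopN S p (dsN p) j : Int) := by
  intro p
  induction p using Nat.strong_induction_on with
  | _ p IH =>
    intro j
    by_cases hp0 : 0 < p
    · have hp0' : (0 : Int) < (p : Int) := by omega
      rw [loopB_pos _ _ _ _ hp0', loopN_pos _ _ _ _ hp0]
      have hmod : PySem.Int.mod (p : Int) 10 = ((p % 10 : Nat) : Int) := by
        rw [PySem.Int.mod_eq_emod_of_pos (by norm_num)]; omega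
      have hdiv : PySem.Int.floordiv (p : Int) 10 = ((p / 10 : Nat) : Int) := by
        rw [PySem.Int.floordiv_eq_ediv_of_pos (by norm_num)]; omega
      have hd0sp : p % 10 ≤ dsN p := by
        have := dsN_div_mod p
        omega
      have hshi : ((dsN p : Nat) : Int) - ((p % 10 : Nat) : Int)
          = ((dsN p - p % 10 : Nat) : Int) := by omega
      have hshi_ds : dsN p - p % 10 = dsN (p / 10) := by
        have := dsN_div_mod p
        omega
      have hmax : max (((p % 10 : Nat) : Int) + 1)
            ((S : Int) - ((dsN p - p % 10 : Nat) : Int) - 9 * ((j : Nat) : Int))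
          = ((max (p % 10 + 1) (S - (dsN p - p % 10) - 9 * j) : Nat) : Int) := by
        rcases le_total ((S : Int) - ((dsN p - p % 10 : Nat) : Int) - 9 * ((j : Nat) : Int))
            (((p % 10 : Nat) : Int) + 1) with hcase | hcase
        · rw [max_eq_left hcase]
          have : S - (dsN p - p % 10) - 9 * j ≤ p % 10 + 1 := by omega
          rw [max_eq_left this]
          push_cast
          ring
        · rw [max_eq_right hcase]
          have : p % 10 + 1 ≤ S - (dsN p - p % 10) - 9 * j := by omega
          rw [max_eq_right this]
          omega
      rw [hmod, hdiv, hshi, hmax]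
      set dN := max (p % 10 + 1) (S - (dsN p - p % 10) - 9 * j) with hdN
      have hcond : (((dN : Nat) : Int) ≤ 9 ∧
            0 ≤ (S : Int) - ((dsN p - p % 10 : Nat) : Int) - ((dN : Nat) : Int))
          ↔ (dN ≤ 9 ∧ (dsN p - p % 10) + dN ≤ S) := by
        constructor
        · intro ⟨a, b⟩; exact ⟨by omega, by omega⟩
        · intro ⟨a, b⟩; exact ⟨by omega, by omega⟩
      by_cases hfeas : dN ≤ 9 ∧ (dsN p - p % 10) + dN ≤ S
      · rw [if_pos (hcond.mpr hfeas), if_pos hfeas]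
        have hargs : (S : Int) - ((dsN p - p % 10 : Nat) : Int) - ((dN : Nat) : Int)
            = ((S - (dsN p - p % 10) - dN : Nat) : Int) := by omega
        rw [hargs, fillB_natCast, Int.toNat_natCast]
        push_cast
        ring
      · rw [if_neg (fun hc => hfeas (hcond.mp hc)), if_neg hfeas]
        have hlt : p / 10 < p := Nat.div_lt_self hp0 (by norm_num)
        have hj1 : ((j : Nat) : Int) + 1 = (((j + 1 : Nat)) : Int) := by push_cast; ring
        rw [hshi_ds, hj1]
        exact IH (p / 10) hlt (j + 1)
    · have hp0' : ¬ (0 : Int) < (p : Int) := by omega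
      rw [loopB_neg _ _ _ _ hp0', loopN_neg _ _ _ _ hp0]
      have hceil : -(PySem.Int.floordiv (-(S : Int)) 9) = (((S + 8) / 9 : Nat) : Int) := by
        rw [PySem.Int.floordiv_eq_ediv_of_pos (by norm_num)]
        omega
      rw [hceil]
      have hLmax : max (((j : Nat) : Int) + 1) (((S + 8) / 9 : Nat) : Int)
          = ((max (j + 1) ((S + 8) / 9) : Nat) : Int) := by
        rcases le_total (((j : Nat) : Int) + 1) (((S + 8) / 9 : Nat) : Int) with hcase | hcase
        · rw [max_eq_right hcase, max_eq_right (by omega)]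
        · rw [max_eq_left hcase, max_eq_left (by omega)]
          push_cast; ring
      rw [hLmax]
      set L := max (j + 1) ((S + 8) / 9) with hL
      have hL1 : j + 1 ≤ L := le_max_left _ _
      have h9 : (S + 8) / 9 ≤ L := le_max_right _ _
      have hceil2 : S ≤ 9 * L := by omega
      have hLsub : ((L : Nat) : Int) - 1 = ((L - 1 : Nat) : Int) := by omega
      rw [hLsub]
      have hlead : max (1 : Int) ((S : Int) - 9 * ((L - 1 : Nat) : Int))
          = ((max 1 (S - 9 * (L - 1)) : Nat) : Int) := by
        rcases le_total ((S : Int) - 9 * ((L - 1 : Nat) : Int)) 1 with hcase | hcase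
        · rw [max_eq_left hcase, max_eq_left (by omega)]
          norm_num
        · rw [max_eq_right hcase, max_eq_right (by omega)]
          omega
      rw [hlead]
      set lead := max 1 (S - 9 * (L - 1)) with hleadN
      have hlead1 : 1 ≤ lead := le_max_left _ _
      have hleadS : lead ≤ S := by
        rw [hleadN]
        exact max_le hS (by omega)
      have hargs : (S : Int) - ((lead : Nat) : Int) = ((S - lead : Nat) : Int) := by omega
      rw [hargs, fillB_natCast, Int.toNat_natCast]
      have htail : tailN S j = lead * 10 ^ (L - 1) + fillN (S - lead) := rfl
      rw [htail]
      push_cast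
      ring

theorem loopA_eq_aux (S : Int) (m : Nat) :
    ∀ (cur : Int) (h : ∃ k : Nat, dsumA (cur + (k : Int)) = S),
      Nat.find h = m → loopA S cur h = cur + (m : Int) := by
  induction m using Nat.strong_induction_on with
  | _ m IH =>
    intro cur h hm
    rw [loopA]
    by_cases hc : dsumA cur = S
    · rw [dif_pos hc]
      have h0 : Nat.find h = 0 := by
        rw [Nat.find_eq_zero]
        simpa using hc
      rw [h0] at hm
      subst hm
      simp
    · rw [dif_neg hc]
      have hlt := pvLoopA_find_lt h hc
      have heq : Nat.find h = Nat.find (pvLoopA_next h hc) + 1 := by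
        apply le_antisymm
        · apply Nat.find_le
          have harg : cur + ((Nat.find (pvLoopA_next h hc) + 1 : Nat) : Int)
              = cur + 1 + ((Nat.find (pvLoopA_next h hc) : Nat) : Int) := by
            push_cast; ring
          rw [harg]
          exact Nat.find_spec (pvLoopA_next h hc)
        · omega
      rw [IH (Nat.find (pvLoopA_next h hc)) (by omega) (cur + 1) (pvLoopA_next h hc) rfl]
      have : m = Nat.find (pvLoopA_next h hc) + 1 := by omega
      subst this
      push_cast
      ring

theorem loopA_eq (S cur : Int) (h : ∃ k : Nat, dsumA (cur + (k : Int)) = S) :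
    loopA S cur h = cur + (Nat.find h : Int) :=
  loopA_eq_aux S (Nat.find h) cur h rfl

-- A returns the least n > X with digit sum 2*digitsum(X)
theorem computeA_least (X : Int) (hX : 1 ≤ X) :
    dsumA (compute X) = 2 * dsumA X ∧ X < compute X ∧
      ∀ n : Nat, dsN n = 2 * dsN X.toNat → X < (n : Int) → compute X ≤ (n : Int) := by
  have hc : compute X = X + 1 + (Nat.find (pvExistsSol X hX) : Int) := by
    unfold compute
    rw [dif_pos hX]
    exact loopA_eq _ _ _
  refine ⟨?_, by rw [hc]; omega, ?_⟩
  · rw [hc]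
    exact Nat.find_spec (pvExistsSol X hX)
  · intro n hn hgt
    rw [hc]
    have hXeq : ((X.toNat : Nat) : Int) = X := by omega
    have h1 : dsumA ((n : Nat) : Int) = 2 * dsumA X := by
      rw [dsumA_natCast, hn, ← hXeq, dsumA_natCast]
      simp only [Int.toNat_natCast]
      push_cast; ring
    obtain ⟨k, hk⟩ : ∃ k : Nat, (n : Int) = X + 1 + (k : Int) := by
      refine ⟨n - (X + 1).toNat, ?_⟩
      omega
    have h2 : dsumA (X + 1 + (k : Int)) = 2 * dsumA X := by rw [← hk]; exact h1
    have hfind := Nat.find_min' (pvExistsSol X hX) h2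
    omega

-- ===== VERDICT (by name: the statement is the Claim_ definition above) =====
theorem compute_spec : Claim_equal_compute := by
  intro X hdom hpre
  have hX : 1 ≤ X := hpre
  unfold Spec_compute
  obtain ⟨N, hXN⟩ : ∃ N : Nat, (N : Int) = X := ⟨X.toNat, by omega⟩
  have hNt : X.toNat = N := by omega
  have hN1 : 1 ≤ N := by omega
  have hS1 : 1 ≤ 2 * dsN N := by have := dsN_pos N hN1; omega
  have hB : compute_alt X = ((loopN (2 * dsN N) N (dsN N) 0 : Nat) : Int) := by
    show loopB (2 * sumLoopB X 0) X (sumLoopB X 0) 0 = _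
    rw [← hXN, sumLoopB_natCast N 0]
    have h0 : (0 : Int) + ((dsN N : Nat) : Int) = ((dsN N : Nat) : Int) := by ring
    rw [h0]
    have h2 : (2 : Int) * ((dsN N : Nat) : Int) = ((2 * dsN N : Nat) : Int) := by
      push_cast; ring
    rw [h2]
    have h3 : (0 : Int) = ((0 : Nat) : Int) := rfl
    rw [h3]
    exact loopB_natCast (2 * dsN N) hS1 N 0
  obtain ⟨hr1, hr2, hr3⟩ := loopN_spec (2 * dsN N) N hS1 N 0 (dsN N) (by simp) rfl
  obtain ⟨ha1, ha2, ha3⟩ := computeA_least X hX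
  rw [hNt] at ha3
  set r := loopN (2 * dsN N) N (dsN N) 0 with hr
  have haN : dsN (compute X).toNat = 2 * dsN N := by
    have hAX : dsumA X = ((dsN N : Nat) : Int) := by rw [← hXN, dsumA_natCast]
    have hAv := ha1
    rw [hAX] at hAv
    have h4 : (((compute X).toNat : Nat) : Int) = compute X := by omega
    have h6 : ((dsN (compute X).toNat : Nat) : Int) = 2 * ((dsN N : Nat) : Int) := by
      rw [← dsumA_natCast, h4]
      exact hAv
    omega
  rw [hB]
  apply le_antisymm
  · apply ha3 r (by simpa using hr1)
    omega
  · have h6 := hr3 (compute X).toNat haN (by simpa using (by omega : N < (compute X).toNat))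
    omega
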